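-- pv_equiv track=rewrite | github.com/daniel-reich/ubiquitous-fiesta | kfwTnnJjo3SKG2pYx_8.py | replace_nums
-- ===== SOURCE A (Python) =====
-- def replace_nums(string):
--     num = ""
--     ans = ""
--     for c in string:
--         if '0' <= c <= '9':
--             num += c
--         else:
--             if num != "":
--                 ans += bin(int(num))[2:]
--                 num = ""
--             ans += c
--     if num != "":
--         ans += bin(int(num))[2:]
--     return ans
-- ===== SOURCE B (Python) =====
-- def replace_nums(string):
--     out = []
--     i, n = 0, len(string)
--     while i < n:
--         if '0' <= string[i] <= '9':
--             j = i
--             while j < n and '0' <= string[j] <= '9':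
--                 j += 1
--             out.append(bin(int(string[i:j]))[2:])
--             i = j
--         else:
--             out.append(string[i])
--             i += 1
--     return ''.join(out)
-- ===== Notes on version B (the rewrite author's own statement) =====
-- stated objective: alternative
-- what changed: B tokenizes the string into maximal digit runs with a two-pointer scan and joins the converted pieces, instead of A's per-character loop threading a digit-buffer accumulator with an end-of-loop flush.
import Mathlib
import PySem

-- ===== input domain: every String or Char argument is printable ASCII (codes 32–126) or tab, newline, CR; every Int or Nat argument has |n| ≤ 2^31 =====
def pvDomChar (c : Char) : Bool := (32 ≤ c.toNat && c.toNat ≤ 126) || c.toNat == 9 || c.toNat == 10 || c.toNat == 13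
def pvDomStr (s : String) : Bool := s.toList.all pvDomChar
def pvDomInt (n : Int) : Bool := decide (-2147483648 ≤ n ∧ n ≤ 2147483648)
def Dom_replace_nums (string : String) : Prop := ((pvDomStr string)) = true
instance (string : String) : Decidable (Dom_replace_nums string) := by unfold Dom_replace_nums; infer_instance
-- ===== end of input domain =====

-- B tokenizes the string into maximal digit runs and joins converted pieces, instead of
-- A's per-character loop threading a 'num' accumulator; same results, alternative structure.

-- shared helpers: the Python builtins both versions call ('0' <= c <= '9', int(), bin()[2:])
def pvIsDig (c : Char) : Bool := decide ('0' ≤ c ∧ c ≤ '9')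

-- int() on a (nonempty) run of ASCII digits — exact there
def pvDecVal (num : List Char) : Nat := num.foldl (fun a c => 10 * a + (c.toNat - 48)) 0

-- binary digits of a positive number, most significant first
def pvBinAux (n : Nat) : List Char :=
  if h : n = 0 then []
  else pvBinAux (n / 2) ++ [if n % 2 = 1 then '1' else '0']
decreasing_by exact Nat.div_lt_self (Nat.pos_of_ne_zero h) one_lt_two

-- bin(int(num))[2:]
def pvBinOf (num : List Char) : List Char :=
  if pvDecVal num = 0 then ['0'] else pvBinAux (pvDecVal num)

-- ===== PORT A =====
-- A's loop: state (num, ans), per character; final flush of num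
def pvGoA : List Char → List Char → List Char → List Char
  | [], num, ans => if num ≠ [] then ans ++ pvBinOf num else ans
  | c :: cs, num, ans =>
      if pvIsDig c then pvGoA cs (num ++ [c]) ans
      else pvGoA cs [] ((if num ≠ [] then ans ++ pvBinOf num else ans) ++ [c])

def replace_nums (string : String) : String := String.ofList (pvGoA string.toList [] [])

-- ===== PORT B =====
-- B's scan: at a digit, take the maximal digit run (inner while), convert, resume past it
def pvGoB : List Char → List Char
  | [] => []
  | c :: cs =>
      if pvIsDig c then
        pvBinOf ((c :: cs).takeWhile pvIsDig) ++ pvGoB (cs.dropWhile pvIsDig)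
      else c :: pvGoB cs
termination_by l => l.length
decreasing_by
  · exact Nat.lt_succ_of_le (List.length_dropWhile_le _ _)
  · simp

def replace_nums_alt (string : String) : String := String.ofList (pvGoB string.toList)

-- ===== PRECONDITION & SPEC =====
def Spec_replace_nums (string : String) (out : String) : Prop := out = replace_nums_alt string
instance (string : String) (out : String) : Decidable (Spec_replace_nums string out) := by unfold Spec_replace_nums; infer_instance

-- ===== CLAIM (what is proved, stated in full; the proofs are below) =====
def Claim_equal_replace_nums : Prop := ∀ (string : String), Dom_replace_nums string → Spec_replace_nums string (replace_nums string)

-- ===== LEMMAS AND PROOFS =====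
lemma pvGoA_eq : ∀ (cs num ans : List Char),
    pvGoA cs num ans =
      ans ++ (if num = [] then pvGoB cs
              else pvBinOf (num ++ cs.takeWhile pvIsDig) ++ pvGoB (cs.dropWhile pvIsDig)) := by
  intro cs
  induction cs with
  | nil =>
      intro num ans
      by_cases h : num = [] <;> simp [pvGoA, pvGoB, h]
  | cons c cs ih =>
      intro num ans
      by_cases hd : pvIsDig c
      · by_cases h : num = []
        · simp [pvGoA, pvGoB, hd, h, ih, List.takeWhile]
        · have hne : num ++ [c] ≠ [] := by simp
          simp [pvGoA, hd, h, ih, hne, List.takeWhile, List.dropWhile]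
      · by_cases h : num = []
        · simp [pvGoA, hd, h, ih, pvGoB]
        · simp [pvGoA, hd, h, ih, pvGoB, List.takeWhile, List.dropWhile]

-- ===== VERDICT (by name: the statement is the Claim_ definition above) =====
theorem replace_nums_spec : Claim_equal_replace_nums := by
  intro s _
  unfold Spec_replace_nums replace_nums replace_nums_alt
  rw [pvGoA_eq]
  simp
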